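-- pv_equiv track=rewrite | github.com/mikaeelghr/KickerGroupGameBot | Models/StaticMethods.py | turn_to_2d_array
-- ===== SOURCE A (Python) =====
-- max_len = 4
--
-- def turn_to_2d_array(array):
--     part_counts = (len(array) + max_len - 1) // max_len
--     answer = []
--     while len(array) > 0:
--         size = (len(array) + part_counts - 1) // part_counts
--         in_while_array = []
--         for i in range(size - 1, -1, -1):
--             in_while_array.append(array[i])
--             array.pop(i)
--         answer.append(in_while_array)
--         part_counts -= 1
--     return answer
-- ===== SOURCE B (Python) =====
-- def turn_to_2d_array(array):
--     n = len(array)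
--     if n == 0:
--         return []
--     k = (n + 3) // 4
--     base, rem = divmod(n, k)
--     answer = []
--     start = 0
--     for j in range(k):
--         size = base + 1 if j < rem else base
--         answer.append(array[start:start + size][::-1])
--         start += size
--     del array[:]
--     return answer
-- ===== Notes on version B (the rewrite author's own statement) =====
-- stated objective: faster
-- what changed: Replaces the destructive while-loop that re-derives ceil(remaining/remaining_parts) each round and pops elements one by one (each pop shifting the tail) with a closed-form divmod sizing (first rem chunks of size base+1, then base) and a single pass of slice-and-reverse over a running start offset.
import Mathlib
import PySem

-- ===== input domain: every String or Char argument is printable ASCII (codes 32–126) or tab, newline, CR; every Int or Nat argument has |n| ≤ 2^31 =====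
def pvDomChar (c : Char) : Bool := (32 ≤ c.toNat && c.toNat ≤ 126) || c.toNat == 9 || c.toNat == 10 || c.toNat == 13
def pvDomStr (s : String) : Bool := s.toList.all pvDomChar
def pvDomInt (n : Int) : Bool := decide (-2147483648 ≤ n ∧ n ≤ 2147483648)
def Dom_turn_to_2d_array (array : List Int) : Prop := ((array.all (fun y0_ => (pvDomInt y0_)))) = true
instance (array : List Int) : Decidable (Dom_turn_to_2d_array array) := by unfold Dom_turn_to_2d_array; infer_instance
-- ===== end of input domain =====

-- B replaces A's destructive pop-one-by-one while-loop by closed-form divmod chunk sizes and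
-- slice-and-reverse in one pass (both Pythons empty the input list in place; the proof is about
-- the return value).


-- ===== PORT A =====
-- 'for i in range(size-1, -1, -1): in_while_array.append(array[i]); array.pop(i)'
-- (indices are always in range on reachable states, so the getD/pop defaults are never used)
def pvAInner (size : Int) (arr : List Int) : List Int × List Int :=
  (PySem.List.pyRange (size - 1) (-1) (-1)).foldl
    (fun (st : List Int × List Int) i =>
      (st.1 ++ [PySem.List.pyGetD st.2 i 0],
       ((PySem.List.pop? st.2 i).map Prod.snd).getD st.2))
    ([], arr)

-- 'while len(array) > 0: …' — fuel = the initial length (each reachable round removes ≥ 1 element)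
def pvALoop : Nat → List Int → Int → List (List Int) → List (List Int)
  | _, [], _, answer => answer
  | 0, _ :: _, _, answer => answer
  | fuel + 1, x :: xs, part_counts, answer =>
    let arr := x :: xs
    let size := PySem.Int.floordiv ((arr.length : Int) + part_counts - 1) part_counts
    let st := pvAInner size arr
    pvALoop fuel st.2 (part_counts - 1) (answer ++ [st.1])

def turn_to_2d_array (array : List Int) : List (List Int) :=
  let part_counts := PySem.Int.floordiv ((array.length : Int) + 4 - 1) 4
  pvALoop array.length array part_counts []

-- ===== PORT B =====
def turn_to_2d_array_alt (array : List Int) : List (List Int) :=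
  let n : Int := array.length
  if n = 0 then []
  else
    let k := PySem.Int.floordiv (n + 3) 4
    let base := PySem.Int.floordiv n k
    let rem := PySem.Int.mod n k
    ((PySem.List.pyRange 0 k 1).foldl
      (fun (st : Int × List (List Int)) j =>
        let size := if j < rem then base + 1 else base
        (st.1 + size,
         st.2 ++ [(PySem.List.slice array (some st.1) (some (st.1 + size))).reverse]))
      (0, [])).2

-- ===== PRECONDITION & SPEC =====
def Spec_turn_to_2d_array (array : List Int) (out : List (List Int)) : Prop := out = turn_to_2d_array_alt array
instance (array : List Int) (out : List (List Int)) : Decidable (Spec_turn_to_2d_array array out) := by unfold Spec_turn_to_2d_array; infer_instance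

-- ===== CLAIM (what is proved, stated in full; the proofs are below) =====
def Claim_equal_turn_to_2d_array : Prop := ∀ (array : List Int), Dom_turn_to_2d_array array → Spec_turn_to_2d_array array (turn_to_2d_array array)

-- ===== LEMMAS AND PROOFS =====

-- common reference shape: pc chunks, each of iterated-ceiling size
def pvChunks (arr : List Int) : Nat → List (List Int)
  | 0 => []
  | pc + 1 =>
    let s := (arr.length + pc) / (pc + 1)
    (arr.take s).reverse :: pvChunks (arr.drop s) pc

theorem pv_ceil_div (l k b r : Nat) (hk : 0 < k) (hl : l = k * b + r) (hr : r < k) :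
    (l + (k - 1)) / k = b + (if r = 0 then 0 else 1) := by
  subst hl
  have h1 : (k * b + r + (k - 1)) / k = b + (r + (k - 1)) / k := by
    rw [Nat.add_assoc, Nat.mul_add_div hk]
  rw [h1]
  by_cases h : r = 0
  · have h0 : (r + (k - 1)) / k = 0 := Nat.div_eq_of_lt (by omega)
    rw [h0]; simp [h]
  · have h0 : (r + (k - 1)) / k = 1 :=
      Nat.div_eq_of_lt_le (by omega) (by omega)
    rw [h0]; simp [h]

theorem pv_step_arith (l k : Nat) (hk : 0 < k) (hkl : k ≤ l) (h4 : l ≤ 4 * k) :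
    1 ≤ (l + (k - 1)) / k ∧ (l + (k - 1)) / k ≤ l ∧
      k - 1 ≤ l - (l + (k - 1)) / k ∧ l - (l + (k - 1)) / k ≤ 4 * (k - 1) := by
  have hbr := Nat.div_add_mod l k
  set b := l / k with hbdef
  set r := l % k with hrdef
  have hr : r < k := Nat.mod_lt l hk
  have hceil := pv_ceil_div l k b r hk (by omega) hr
  rw [hceil]
  have hb1 : 1 ≤ b := (Nat.one_le_div_iff hk).mpr hkl
  have hb4 : b ≤ 4 := by
    have := Nat.div_le_div_right (c := k) h4
    rwa [Nat.mul_div_cancel 4 hk] at this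
  have hQ : k * b = (k - 1) * b + b := by
    cases k with
    | zero => omega
    | succ m => simp only [Nat.add_sub_cancel]; exact Nat.succ_mul m b
  by_cases hb3 : b ≤ 3
  · have hQ3 : (k - 1) * b ≤ (k - 1) * 3 := Nat.mul_le_mul_left _ hb3
    have hQ1 : (k - 1) * 1 ≤ (k - 1) * b := Nat.mul_le_mul_left _ hb1
    by_cases h : r = 0 <;> simp [h] <;> omega
  · have hb : b = 4 := by omega
    rw [hb] at hbr hQ
    have h44 : k * 4 = 4 * k := Nat.mul_comm k 4
    have hr0 : r = 0 := by omega
    have h34 : (k - 1) * 4 = 4 * (k - 1) := Nat.mul_comm _ 4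
    simp [hr0, hb]
    omega

theorem pvAInner_fold (s : Nat) (acc arr : List Int) (h : s ≤ arr.length) :
    (PySem.List.pyRange ((s : Int) - 1) (-1) (-1)).foldl
      (fun (st : List Int × List Int) i =>
        (st.1 ++ [PySem.List.pyGetD st.2 i 0],
         ((PySem.List.pop? st.2 i).map Prod.snd).getD st.2))
      (acc, arr)
    = (acc ++ (arr.take s).reverse, arr.drop s) := by
  induction s generalizing acc arr with
  | zero =>
    rw [PySem.List.pyRange_neg_one_eq_nil (by norm_num)]
    simp
  | succ n ih =>
    have hn : n < arr.length := by omega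
    have hcast : ((n + 1 : Nat) : Int) - 1 = (n : Int) := by push_cast; ring
    rw [hcast, PySem.List.pyRange_neg_one_cons (by omega)]
    rw [List.foldl_cons]
    have hget : PySem.List.pyGetD arr ((n : Int)) (0:Int) = arr[n] := by
      rw [PySem.List.pyGetD_natCast]; exact List.getD_eq_getElem arr 0 hn
    have hpop : ((PySem.List.pop? arr ((n : Int))).map Prod.snd).getD arr = arr.eraseIdx n := by
      rw [PySem.List.pop?_natCast arr n hn]; rfl
    simp only [hget, hpop]
    rw [ih (acc ++ [arr[n]]) (arr.eraseIdx n) (by rw [List.length_eraseIdx_of_lt hn]; omega)]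
    have he : arr.eraseIdx n = arr.take n ++ arr.drop (n+1) := List.eraseIdx_eq_take_drop_succ arr n
    have hlt : (arr.take n).length = n := List.length_take_of_le (le_of_lt hn)
    rw [Prod.mk.injEq]
    refine ⟨?_, ?_⟩
    · have ht : List.take (n+1) arr = List.take n arr ++ [arr[n]] := by
        rw [List.take_add_one, List.getElem?_eq_getElem hn]; rfl
      rw [he, List.take_append_of_le_length (by omega), List.take_take, ht]
      simp only [Nat.min_self, List.reverse_append, List.reverse_singleton,
        List.append_assoc, List.cons_append, List.nil_append]
    · rw [he, List.drop_append_of_le_length (by omega),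
        List.drop_eq_nil_of_le (by omega)]
      simp

theorem pvALoop_eq (pc : Nat) (arr : List Int) (acc : List (List Int)) (fuel : Nat)
    (hpc : pc ≤ arr.length) (h4 : arr.length ≤ 4 * pc) (hfuel : arr.length ≤ fuel) :
    pvALoop fuel arr (pc : Int) acc = acc ++ pvChunks arr pc := by
  induction pc generalizing arr acc fuel with
  | zero =>
    have harr : arr = [] := by
      cases arr with
      | nil => rfl
      | cons a t => simp at h4
    subst harr
    cases fuel <;> simp [pvALoop, pvChunks]
  | succ m ih =>
    have hl1 : 1 ≤ arr.length := by omega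
    obtain ⟨x, xs, rfl⟩ : ∃ x xs, arr = x :: xs := by
      cases arr with
      | nil => simp at hl1
      | cons a t => exact ⟨_, _, rfl⟩
    obtain ⟨f, rfl⟩ : ∃ f, fuel = f + 1 := ⟨fuel - 1, by omega⟩
    have hstep := pv_step_arith (x :: xs).length (m+1) (Nat.succ_pos m) (by omega) (by omega)
    rw [Nat.add_sub_cancel] at hstep
    obtain ⟨hs1, hsl, hlow, hhigh⟩ := hstep
    set sN := ((x :: xs).length + m) / (m + 1) with hsdef
    have hsize : PySem.Int.floordiv (((x :: xs).length : Int) + ((m+1 : Nat) : Int) - 1) ((m+1 : Nat) : Int)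
        = ((sN : Nat) : Int) := by
      have h1 : (((x :: xs).length : Int) + ((m+1 : Nat) : Int) - 1) = (((x :: xs).length + m : Nat) : Int) := by
        push_cast; ring
      rw [h1, hsdef]
      exact_mod_cast PySem.Int.floordiv_natCast ((x :: xs).length + m) (m+1)
    have hInner : pvAInner ((sN : Nat) : Int) (x :: xs)
        = (((x :: xs).take sN).reverse, (x :: xs).drop sN) := by
      unfold pvAInner
      simpa using pvAInner_fold sN [] (x :: xs) hsl
    simp only [pvALoop, hsize, hInner]
    have hm1 : ((m+1 : Nat) : Int) - 1 = ((m : Nat) : Int) := by push_cast; ring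
    rw [hm1]
    rw [ih ((x :: xs).drop sN) (acc ++ [((x :: xs).take sN).reverse]) f
      (by rw [List.length_drop]; omega)
      (by rw [List.length_drop]; omega)
      (by rw [List.length_drop]; omega)]
    simp only [pvChunks, List.length_cons]
    have hsn : (xs.length + 1 + m) / (m + 1) = sN := by rw [hsdef]; simp
    rw [hsn]
    simp

theorem pvBfold (whole : List Int) (bN rN : Nat) (c : Nat) :
    ∀ (j0 start : Nat) (acc : List (List Int)),
    (whole.drop start).length = c * bN + (rN - j0) →
    (0 < c → rN - j0 < c) → (c = 0 → rN - j0 = 0) →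
    ((List.range c).foldl
      (fun (st : Int × List (List Int)) i =>
        (st.1 + (if ((j0 + i : Nat) : Int) < (rN : Int) then (bN : Int) + 1 else (bN : Int)),
         st.2 ++ [(PySem.List.slice whole (some st.1)
            (some (st.1 + (if ((j0 + i : Nat) : Int) < (rN : Int) then (bN : Int) + 1 else (bN : Int))))).reverse]))
      ((start : Int), acc)).2
    = acc ++ pvChunks (whole.drop start) c := by
  induction c with
  | zero => intro j0 start acc hl h1 h2; simp [pvChunks]
  | succ c ih =>
    intro j0 start acc hl h1 h2
    have hr' : rN - j0 < c + 1 := h1 (Nat.succ_pos c)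
    set l' := (whole.drop start).length with hl'def
    have hmul : (c + 1) * bN = c * bN + bN := Nat.succ_mul c bN
    -- head chunk size of pvChunks
    have hceil := pv_ceil_div l' (c+1) bN (rN - j0) (Nat.succ_pos c) (by omega) hr'
    rw [Nat.add_sub_cancel] at hceil
    set sz : Nat := bN + (if rN - j0 = 0 then 0 else 1) with hszdef
    -- the Int size in the fold at i = 0
    have hsize0 : (if ((j0 + 0 : Nat) : Int) < (rN : Int) then (bN : Int) + 1 else (bN : Int)) = (sz : Nat) := by
      by_cases hjr : j0 < rN
      · rw [if_pos (by exact_mod_cast (by omega : j0 + 0 < rN))]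
        rw [hszdef, if_neg (by omega)]
        push_cast; ring
      · rw [if_neg (by push_cast; omega)]
        rw [hszdef, if_pos (by omega)]
        push_cast; ring
    rw [List.range_succ_eq_map, List.foldl_cons, List.foldl_map]
    simp only [hsize0]
    have hslice : PySem.List.slice whole (some (start : Int)) (some ((start : Int) + (sz : Int)))
        = (whole.drop start).take sz := PySem.List.slice_natCast_add whole start sz
    rw [hslice]
    have hstart' : ((start : Int) + (sz : Int)) = (((start + sz : Nat)) : Int) := by push_cast; ring
    rw [hstart']
    have hshift : (fun (st : Int × List (List Int)) i =>
        (st.1 + (if ((j0 + (i + 1) : Nat) : Int) < (rN : Int) then (bN : Int) + 1 else (bN : Int)),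
         st.2 ++ [(PySem.List.slice whole (some st.1)
            (some (st.1 + (if ((j0 + (i + 1) : Nat) : Int) < (rN : Int) then (bN : Int) + 1 else (bN : Int))))).reverse]))
      = (fun (st : Int × List (List Int)) i =>
        (st.1 + (if (((j0 + 1) + i : Nat) : Int) < (rN : Int) then (bN : Int) + 1 else (bN : Int)),
         st.2 ++ [(PySem.List.slice whole (some st.1)
            (some (st.1 + (if (((j0 + 1) + i : Nat) : Int) < (rN : Int) then (bN : Int) + 1 else (bN : Int))))).reverse])) := by
      funext st i
      have : j0 + (i + 1) = (j0 + 1) + i := by omega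
      rw [this]
    rw [hshift]
    have hA : (List.drop (start + sz) whole).length = whole.length - (start + sz) :=
      List.length_drop
    have hB : l' = whole.length - start := by rw [hl'def, List.length_drop]
    have hlen' : (List.drop (start + sz) whole).length = c * bN + (rN - (j0 + 1)) := by
      by_cases h0 : rN - j0 = 0
      · have hsz' : sz = bN := by rw [hszdef, if_pos h0]; omega
        omega
      · have hsz' : sz = bN + 1 := by rw [hszdef, if_neg h0]
        omega
    rw [ih (j0 + 1) (start + sz) (acc ++ [((whole.drop start).take sz).reverse])
      hlen' (by omega) (by omega)]
    simp only [pvChunks]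
    rw [hceil]
    simp

theorem turn_to_2d_array_eq_chunks (array : List Int) :
    turn_to_2d_array array = pvChunks array ((array.length + 3) / 4) := by
  unfold turn_to_2d_array
  have hk : PySem.Int.floordiv ((array.length : Int) + 4 - 1) 4
      = (((array.length + 3) / 4 : Nat) : Int) := by
    have h1 : ((array.length : Int) + 4 - 1) = ((array.length + 3 : Nat) : Int) := by
      push_cast; ring
    rw [h1]
    exact_mod_cast PySem.Int.floordiv_natCast (array.length + 3) 4
  rw [hk]
  have hdiv := Nat.div_add_mod (array.length + 3) 4
  have hmod : (array.length + 3) % 4 < 4 := Nat.mod_lt _ (by norm_num)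
  rw [pvALoop_eq ((array.length + 3) / 4) array [] array.length (by omega) (by omega) (le_refl _)]
  simp

theorem turn_to_2d_array_alt_eq_chunks (array : List Int) :
    turn_to_2d_array_alt array = pvChunks array ((array.length + 3) / 4) := by
  unfold turn_to_2d_array_alt
  by_cases h0 : (array.length : Int) = 0
  · rw [if_pos h0]
    have harr : array = [] := List.length_eq_zero_iff.mp (by exact_mod_cast h0)
    subst harr
    rfl
  · rw [if_neg h0]
    have hl1 : 1 ≤ array.length := by
      rcases Nat.eq_zero_or_pos array.length with h | h
      · exact absurd (by exact_mod_cast h) h0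
      · exact h
    set l := array.length with hldef
    set kN := (l + 3) / 4 with hkdef
    have hkPos : 0 < kN := by
      have h1 := Nat.div_add_mod (l + 3) 4
      have h2 : (l + 3) % 4 < 4 := Nat.mod_lt _ (by norm_num)
      omega
    have hk : PySem.Int.floordiv ((l : Int) + 3) 4 = ((kN : Nat) : Int) := by
      have h1 : ((l : Int) + 3) = ((l + 3 : Nat) : Int) := by push_cast; ring
      rw [h1, hkdef]
      exact_mod_cast PySem.Int.floordiv_natCast (l + 3) 4
    rw [hk]
    set bN := l / kN with hbdef
    set rN := l % kN with hrdef
    have hbase : PySem.Int.floordiv (l : Int) ((kN : Nat) : Int) = ((bN : Nat) : Int) := by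
      rw [hbdef]
      exact_mod_cast PySem.Int.floordiv_natCast l kN
    have hrem : PySem.Int.mod (l : Int) ((kN : Nat) : Int) = ((rN : Nat) : Int) := by
      rw [hrdef]
      exact_mod_cast PySem.Int.mod_natCast l kN
    simp only [hbase, hrem, PySem.List.pyRange_zero_natCast, List.foldl_map]
    have hmain := pvBfold array bN rN kN 0 0 []
      (by
        simp only [List.drop_zero, Nat.sub_zero, hbdef, hrdef]
        exact (Nat.div_add_mod l kN).symm)
      (fun _ => by rw [hrdef]; exact Nat.mod_lt _ hkPos)
      (by omega)
    simpa using hmain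

-- ===== VERDICT (by name: the statement is the Claim_ definition above) =====
theorem turn_to_2d_array_spec : Claim_equal_turn_to_2d_array := by
  intro array _
  unfold Spec_turn_to_2d_array
  rw [turn_to_2d_array_eq_chunks, turn_to_2d_array_alt_eq_chunks]
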